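-- pv_equiv track=rewrite | github.com/KrzysiekMiskowicz/WDI | Ćwiczenia_4/Zadanie_11.py | find_touched_friends
-- ===== SOURCE A (Python) =====
-- MAX = 4
--
-- def is_friend(n1, n2):
--     n1_digits = [False for _ in range(10)]
--     n2_digits = [False for _ in range(10)]
--     tmp = n1
--     while tmp > 0:
--         n1_digits[tmp % 10] = True
--         tmp //= 10
--
--     tmp = n2
--     while tmp > 0:
--         n2_digits[tmp % 10] = True
--         tmp //= 10
--
--     return n1_digits == n2_digits
--
-- def find_touched_friends(t):
--     result = 0
--     for i in range(MAX):
--         for j in range(MAX):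
--             only_friends = True
--             set_ref = False
--             ref = 0
--             for a in range(-1, 2):
--                 for b in range(-1, 2):
--                     if 0 <= i+a < MAX and 0 <= j+b < MAX and (a != 0 or b != 0):
--                         if not set_ref:
--                             set_ref = True
--                             ref = t[i+a][j+b]
--                         else:
--                             if not is_friend(ref, t[i+a][j+b]):
--                                 only_friends = False
--                                 break
--
--                 if not only_friends:
--                     break
--
--             if only_friends:
--                 result += 1
--
--     return result
-- ===== SOURCE B (Python) =====
-- MAX = 4
--
-- def find_touched_friends(t):
--     # Complement counting by scattering over discordant pairs: mark every cell
--     # that touches two cells with different digit-sets, then count unmarked cells.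
--     def sig(n):
--         m = 0
--         while n > 0:
--             m |= 1 << n % 10
--             n //= 10
--         return m
--
--     sigs = [[sig(t[x][y]) for y in range(MAX)] for x in range(MAX)]
--     cells = [(x, y) for x in range(MAX) for y in range(MAX)]
--     bad = [[False] * MAX for _ in range(MAX)]
--     for u in cells:
--         for v in cells:
--             if u < v and sigs[u[0]][u[1]] != sigs[v[0]][v[1]]:
--                 for (x, y) in cells:
--                     if (x, y) != u and (x, y) != v \
--                             and abs(x - u[0]) <= 1 and abs(y - u[1]) <= 1 \
--                             and abs(x - v[0]) <= 1 and abs(y - v[1]) <= 1: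
--                         bad[x][y] = True
--     return sum(1 for (x, y) in cells if not bad[x][y])
-- ===== Notes on version B (the rewrite author's own statement) =====
-- stated objective: alternative
-- what changed: B inverts the computation: instead of scanning each cell's neighborhood comparing neighbors to a reference with early breaks, it scatters over every discordant pair of cells (different digit-set signatures), marks all common touching cells as bad in a boolean table, and counts the unmarked cells (complement counting).
-- outside the precondition, e.g. on find_touched_friends([[10, 3, 3, 10], [4, 4, 4, 2], [2, 0, 3, 10]]): A returns 0, B raises IndexError
import Mathlib
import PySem

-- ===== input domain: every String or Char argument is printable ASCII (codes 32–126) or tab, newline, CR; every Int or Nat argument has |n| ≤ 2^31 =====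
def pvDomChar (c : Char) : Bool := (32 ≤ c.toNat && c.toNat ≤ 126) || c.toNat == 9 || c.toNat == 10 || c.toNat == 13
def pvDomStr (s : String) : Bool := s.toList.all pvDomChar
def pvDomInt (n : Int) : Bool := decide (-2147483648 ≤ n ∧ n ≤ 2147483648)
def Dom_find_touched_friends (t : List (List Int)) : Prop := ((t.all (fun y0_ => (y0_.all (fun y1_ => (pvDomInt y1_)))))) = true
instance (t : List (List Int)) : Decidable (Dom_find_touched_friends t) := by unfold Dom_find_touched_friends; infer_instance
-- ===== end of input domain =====

-- B inverts the computation: it scatters over every pair of cells with different digit-set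
-- signatures, marking their common touching cells bad, and counts the unmarked cells;
-- A gathers each cell's neighborhood, comparing neighbors to a reference with early breaks.

-- t[r][c], total stand-in for Python indexing; Pre_ guarantees the index is in range (shared helper)
def cellAt (t : List (List Int)) (r c : Int) : Int :=
  PySem.List.pyGetD (PySem.List.pyGetD t r []) c 0

-- ===== PORT A =====
-- the two while-loops of is_friend: digits[tmp % 10] = True; tmp //= 10
def digitsLoop (tmp : Int) (ds : List Bool) : List Bool :=
  if _h : tmp > 0 then
    digitsLoop (PySem.Int.floordiv tmp 10) (ds.set (PySem.Int.mod tmp 10).toNat true)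
  else ds
termination_by tmp.toNat
decreasing_by
  rw [PySem.Int.floordiv_eq_ediv_of_pos (by norm_num : (0:Int) < 10)]
  omega

def is_friend (n1 n2 : Int) : Bool :=
  digitsLoop n1 (List.replicate 10 false) == digitsLoop n2 (List.replicate 10 false)

-- inner 'for b in range(-1, 2)' with the break; state = (only_friends, set_ref, ref)
def loopB_A (t : List (List Int)) (i j a : Int) : List Int → Bool → Int → Bool × Bool × Int
  | [], _set_ref, ref => (true, _set_ref, ref)
  | b :: bs, set_ref, ref =>
    if 0 ≤ i + a ∧ i + a < 4 ∧ 0 ≤ j + b ∧ j + b < 4 ∧ (a ≠ 0 ∨ b ≠ 0) then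
      if !set_ref then
        loopB_A t i j a bs true (cellAt t (i + a) (j + b))
      else
        if !(is_friend ref (cellAt t (i + a) (j + b))) then
          (false, set_ref, ref)                       -- only_friends = False; break
        else
          loopB_A t i j a bs set_ref ref
    else
      loopB_A t i j a bs set_ref ref

-- outer 'for a in range(-1, 2)' with 'if not only_friends: break'
def loopA_A (t : List (List Int)) (i j : Int) : List Int → Bool → Int → Bool × Bool × Int
  | [], _set_ref, ref => (true, _set_ref, ref)
  | a :: as_, set_ref, ref =>
    match loopB_A t i j a (PySem.List.pyRange (-1) 2 1) set_ref ref with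
    | (false, s, r) => (false, s, r)
    | (true, s, r) => loopA_A t i j as_ s r

def find_touched_friends (t : List (List Int)) : Int :=
  (PySem.List.pyRange 0 4 1).foldl (fun result i =>
    (PySem.List.pyRange 0 4 1).foldl (fun result j =>
      if (loopA_A t i j (PySem.List.pyRange (-1) 2 1) false 0).1 then result + 1 else result)
      result) 0

-- ===== PORT B =====
-- while n > 0: m |= 1 << n % 10; n //= 10
def sigLoop (n m : Int) : Int :=
  if _h : n > 0 then
    sigLoop (PySem.Int.floordiv n 10) (PySem.Int.bor m ((1 : Int) <<< (PySem.Int.mod n 10).toNat))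
  else m
termination_by n.toNat
decreasing_by
  rw [PySem.Int.floordiv_eq_ediv_of_pos (by norm_num : (0:Int) < 10)]
  omega

def sig (n : Int) : Int := sigLoop n 0

-- sigs = [[sig(t[x][y]) for y in range(MAX)] for x in range(MAX)]
def sigTable (t : List (List Int)) : List (List Int) :=
  (PySem.List.pyRange 0 4 1).map (fun x => (PySem.List.pyRange 0 4 1).map (fun y => sig (cellAt t x y)))

-- cells = [(x, y) for x in range(MAX) for y in range(MAX)]
def cellsB : List (Int × Int) :=
  (PySem.List.pyRange 0 4 1).flatMap (fun x => (PySem.List.pyRange 0 4 1).map (fun y => (x, y)))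

-- bad[x][y] (read) and bad[x][y] = True (write); indices are always in range 0..3 here
def getCell (bad : List (List Bool)) (c : Int × Int) : Bool :=
  PySem.List.pyGetD (PySem.List.pyGetD bad c.1 []) c.2 false

def setCell (bad : List (List Bool)) (c : Int × Int) : List (List Bool) :=
  bad.set c.1.toNat ((PySem.List.pyGetD bad c.1 []).set c.2.toNat true)

-- the innermost loop: mark every cell touching both u and v (and distinct from them)
def markPair (bad : List (List Bool)) (u v : Int × Int) : List (List Bool) :=
  cellsB.foldl (fun bad c =>
    if c ≠ u ∧ c ≠ v ∧ |c.1 - u.1| ≤ 1 ∧ |c.2 - u.2| ≤ 1 ∧ |c.1 - v.1| ≤ 1 ∧ |c.2 - v.2| ≤ 1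
    then setCell bad c else bad) bad

-- the two outer loops over pairs u, v of cells (u < v lexicographic, differing signatures)
def badTable (t : List (List Int)) : List (List Bool) :=
  let sigs := sigTable t
  cellsB.foldl (fun bad u =>
    cellsB.foldl (fun bad v =>
      if (u.1 < v.1 ∨ (u.1 = v.1 ∧ u.2 < v.2)) ∧ cellAt sigs u.1 u.2 ≠ cellAt sigs v.1 v.2
      then markPair bad u v else bad) bad)
    (List.replicate 4 (List.replicate 4 false))

def find_touched_friends_alt (t : List (List Int)) : Int :=
  let bad := badTable t
  cellsB.foldl (fun acc c => if getCell bad c = false then acc + 1 else acc) 0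

-- ===== PRECONDITION & SPEC =====
-- Pre_ excludes grids smaller than 4x4: there Python A usually raises IndexError (and on the few
-- such grids where an early break lets A return, B's precomputed signature table still raises).
def Pre_find_touched_friends (t : List (List Int)) : Prop :=
  4 ≤ t.length ∧ ∀ row ∈ t.take 4, 4 ≤ row.length
instance (t : List (List Int)) : Decidable (Pre_find_touched_friends t) := by
  unfold Pre_find_touched_friends; infer_instance

def pvWitness_find_touched_friends : List (List Int) :=
  [[1, 2, 3, 4], [5, 6, 7, 8], [9, 10, 11, 12], [13, 14, 15, 21]]

def Spec_find_touched_friends (t : List (List Int)) (out : Int) : Prop := out = find_touched_friends_alt t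
instance (t : List (List Int)) (out : Int) : Decidable (Spec_find_touched_friends t out) := by
  unfold Spec_find_touched_friends; infer_instance

-- ===== CLAIM (what is proved, stated in full; the proofs are below) =====
def Claim_equal_find_touched_friends : Prop := ∀ (t : List (List Int)), Dom_find_touched_friends t → Pre_find_touched_friends t → Spec_find_touched_friends t (find_touched_friends t)

-- ===== LEMMAS AND PROOFS =====

-- ---- digit-set machinery shared by both sides ----
def hasDig (n : Int) (d : Nat) : Bool :=
  if _h : n > 0 then
    (PySem.Int.mod n 10 == (d : Int)) || hasDig (PySem.Int.floordiv n 10) d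
  else false
termination_by n.toNat
decreasing_by
  rw [PySem.Int.floordiv_eq_ediv_of_pos (by norm_num : (0:Int) < 10)]
  omega

def natMask (n : Int) : Nat :=
  if _h : n > 0 then
    natMask (PySem.Int.floordiv n 10) ||| (1 <<< (PySem.Int.mod n 10).toNat)
  else 0
termination_by n.toNat
decreasing_by
  rw [PySem.Int.floordiv_eq_ediv_of_pos (by norm_num : (0:Int) < 10)]
  omega

lemma digitsLoop_eq (n : Int) (acc : List Bool) (hl : acc.length = 10) :
    digitsLoop n acc = (List.range 10).map (fun d => acc.getD d false || hasDig n d) := by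
  induction n, acc using digitsLoop.induct with
  | case1 tmp ds h ih =>
    have h10 : (0:Int) < 10 := by norm_num
    have hr0 := PySem.Int.mod_nonneg tmp h10
    have hrlt := PySem.Int.mod_lt tmp h10
    set r : Nat := (PySem.Int.mod tmp 10).toNat with hrdef
    have hrr : PySem.Int.mod tmp 10 = (r : Int) := (Int.toNat_of_nonneg hr0).symm
    have hr10 : r < 10 := by omega
    rw [digitsLoop, dif_pos h, ih (by simp [hl])]
    apply List.map_congr_left
    intro d hd
    rw [List.mem_range] at hd
    conv_rhs => rw [hasDig, dif_pos h, hrr]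
    by_cases hdr : d = r
    · subst hdr
      simp [List.getD_eq_getElem?_getD, hl, hd]
    · have hbe : ((r : Int) == (d : Int)) = false := by simp; omega
      simp [List.getD_eq_getElem?_getD, hl, hd, Ne.symm hdr, hbe]
  | case2 tmp ds h =>
    rw [digitsLoop, dif_neg h]
    have : ∀ d, hasDig tmp d = false := fun d => by rw [hasDig, dif_neg h]
    simp only [this, Bool.or_false]
    symm
    apply List.ext_getElem (by simp [hl])
    intro i h1 h2
    simp [List.getD_eq_getElem?_getD, List.getElem?_eq_getElem h2]

lemma shiftCast (k : Nat) : ((1:Int) <<< k) = ((1 <<< k : Nat) : Int) := Int.mem_toNat?.mp rfl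

lemma sigLoop_natMask (n m : Int) : ∀ c : Nat, m = (c : Int) → sigLoop n m = ((c ||| natMask n : Nat) : Int) := by
  induction n, m using sigLoop.induct with
  | case1 n m h ih =>
    rintro c rfl
    rw [sigLoop, dif_pos h, natMask, dif_pos h]
    rw [ih (c ||| (1 <<< (PySem.Int.mod n 10).toNat))
      (by rw [shiftCast, PySem.Int.bor_natCast])]
    congr 1
    rw [Nat.lor_assoc, Nat.lor_comm (1 <<< (PySem.Int.mod n 10).toNat)]
  | case2 n m h =>
    rintro c rfl
    rw [sigLoop, dif_neg h, natMask, dif_neg h]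
    simp

lemma testBit_one_shift (r d : Nat) : (1 <<< r).testBit d = (r == d) := by
  rw [Nat.testBit_shiftLeft]
  by_cases hrd : r = d
  · subst hrd; simp
  · rcases Nat.lt_or_ge d r with h1 | h1
    · simp [Nat.not_le.mpr h1, hrd]
    · have hne : d - r ≠ 0 := by omega
      have h2 : (r == d) = false := by simp [hrd]
      have h3 : Nat.testBit 1 (d - r) = false := by
        by_contra hc
        have h4 : Nat.testBit 1 (d - r) = true := by
          revert hc; cases Nat.testBit 1 (d - r) <;> simp
        exact hne (Nat.testBit_one_eq_true_iff_self_eq_zero.mp h4)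
      simp [h1, h2, h3]

lemma testBit_natMask (n : Int) (d : Nat) : (natMask n).testBit d = hasDig n d := by
  induction n using natMask.induct with
  | case1 n h ih =>
    rw [natMask, dif_pos h, hasDig, dif_pos h, Nat.testBit_lor, ih]
    have hr0 := PySem.Int.mod_nonneg n (by norm_num : (0:Int) < 10)
    obtain ⟨r, hrr⟩ : ∃ r : Nat, PySem.Int.mod n 10 = (r : Int) :=
      ⟨_, (Int.toNat_of_nonneg hr0).symm⟩
    rw [hrr, Int.toNat_natCast, testBit_one_shift, Bool.or_comm]
    have : ((r : Int) == (d : Int)) = (r == d) := by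
      by_cases hrd : r = d <;> simp [hrd]
    rw [this]
  | case2 n h =>
    rw [natMask, dif_neg h, hasDig, dif_neg h]
    simp

lemma hasDig_ge (n : Int) (d : Nat) (hd : 10 ≤ d) : hasDig n d = false := by
  induction n using hasDig.induct with
  | case1 n h ih =>
    rw [hasDig, dif_pos h, ih]
    have h1 := PySem.Int.mod_lt n (by norm_num : (0:Int) < 10)
    have h2 := PySem.Int.mod_nonneg n (by norm_num : (0:Int) < 10)
    have : (PySem.Int.mod n 10 == (d : Int)) = false := by
      simp only [beq_eq_false_iff_ne, ne_eq]
      omega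
    rw [this, Bool.or_false]
  | case2 n h => rw [hasDig, dif_neg h]

lemma sig_natMask (n : Int) : sig n = ((natMask n : Nat) : Int) := by
  rw [sig, sigLoop_natMask n 0 0 (by simp)]
  simp

lemma sig_eq_iff (a b : Int) : sig a = sig b ↔ ∀ d, hasDig a d = hasDig b d := by
  rw [sig_natMask, sig_natMask, Int.natCast_inj]
  constructor
  · intro h d; rw [← testBit_natMask, ← testBit_natMask, h]
  · intro h; apply Nat.eq_of_testBit_eq; intro d; rw [testBit_natMask, testBit_natMask, h]

lemma is_friend_eq (a b : Int) : is_friend a b = (sig a == sig b) := by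
  have h1 : ∀ n : Int, digitsLoop n (List.replicate 10 false)
      = (List.range 10).map (fun d => hasDig n d) := by
    intro n
    rw [digitsLoop_eq n _ (by simp)]
    apply List.map_congr_left
    intro d hd
    rw [List.mem_range] at hd
    rw [List.getD_eq_getElem?_getD, List.getElem?_replicate, if_pos hd]
    simp
  have h2 : (List.range 10).map (fun d => hasDig a d) = (List.range 10).map (fun d => hasDig b d)
      ↔ sig a = sig b := by
    rw [List.map_inj_left, sig_eq_iff]
    constructor
    · intro h d
      by_cases hd : d < 10
      · exact h d (List.mem_range.mpr hd)
      · rw [hasDig_ge a d (by omega), hasDig_ge b d (by omega)]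
    · intro h d _; exact h d
  rw [is_friend, h1, h1]
  apply Bool.eq_iff_iff.mpr
  simp only [beq_iff_eq]
  exact h2

-- ---- A's scan characterised ----
def scanA : List Int → Bool → Int → Bool × Bool × Int
  | [], s, r => (true, s, r)
  | v :: vs, false, _ => scanA vs true v
  | v :: vs, true, r => if is_friend r v then scanA vs true r else (false, true, r)

def neighValsRow (t : List (List Int)) (i j a : Int) (bs : List Int) : List Int :=
  (bs.filter (fun b =>
    decide (0 ≤ i + a ∧ i + a < 4 ∧ 0 ≤ j + b ∧ j + b < 4 ∧ (a ≠ 0 ∨ b ≠ 0)))).map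
    (fun b => cellAt t (i + a) (j + b))

def valsA (t : List (List Int)) (i j : Int) : List Int :=
  (PySem.List.pyRange (-1) 2 1).flatMap (fun a => neighValsRow t i j a (PySem.List.pyRange (-1) 2 1))

lemma loopB_scanA (t : List (List Int)) (i j a : Int) :
    ∀ (bs : List Int) (s : Bool) (r : Int),
      loopB_A t i j a bs s r = scanA (neighValsRow t i j a bs) s r := by
  intro bs
  induction bs with
  | nil => intro s r; rfl
  | cons b bs ih =>
    intro s r
    rw [loopB_A]
    by_cases hc : 0 ≤ i + a ∧ i + a < 4 ∧ 0 ≤ j + b ∧ j + b < 4 ∧ (a ≠ 0 ∨ b ≠ 0)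
    · rw [if_pos hc]
      have hf : neighValsRow t i j a (b :: bs)
          = cellAt t (i + a) (j + b) :: neighValsRow t i j a bs := by
        simp [neighValsRow, hc]
      rw [hf]
      cases s with
      | false => simp [scanA, ih]
      | true =>
        by_cases hfr : is_friend r (cellAt t (i + a) (j + b)) <;>
          simp [scanA, hfr, ih]
    · rw [if_neg hc]
      have hf : neighValsRow t i j a (b :: bs) = neighValsRow t i j a bs := by
        simp [neighValsRow, hc]
      rw [hf, ih]

lemma scanA_append : ∀ (vs ws : List Int) (s : Bool) (r : Int),
    scanA (vs ++ ws) s r =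
      (match scanA vs s r with
        | (false, s', r') => (false, s', r')
        | (true, s', r') => scanA ws s' r') := by
  intro vs
  induction vs with
  | nil => intro ws s r; rfl
  | cons v vs ih =>
    intro ws s r
    cases s with
    | false => simpa [scanA] using ih ws true v
    | true =>
      by_cases hfr : is_friend r v <;> simp [scanA, hfr, ih]

lemma loopA_scanA (t : List (List Int)) (i j : Int) :
    ∀ (as_ : List Int) (s : Bool) (r : Int),
      loopA_A t i j as_ s r =
        scanA (as_.flatMap (fun a => neighValsRow t i j a (PySem.List.pyRange (-1) 2 1))) s r := by
  intro as_
  induction as_ with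
  | nil => intro s r; rfl
  | cons a as_ ih =>
    intro s r
    rw [loopA_A, List.flatMap_cons, scanA_append, loopB_scanA]
    rcases h : scanA (neighValsRow t i j a (PySem.List.pyRange (-1) 2 1)) s r with ⟨b, s', r'⟩
    cases b <;> simp [ih]

lemma scanA_true (v : Int) : ∀ (vs : List Int),
    ((scanA vs true v).1 = true) ↔ ∀ w ∈ vs, is_friend v w := by
  intro vs
  induction vs with
  | nil => simp [scanA]
  | cons w ws ih =>
    by_cases hfr : is_friend v w <;> simp [scanA, hfr, ih]

lemma scanA_allEq (vs : List Int) :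
    ((scanA vs false 0).1 = true) ↔ ∀ x ∈ vs, ∀ y ∈ vs, sig x = sig y := by
  cases vs with
  | nil => simp [scanA]
  | cons v ws =>
    rw [show scanA (v :: ws) false 0 = scanA ws true v from rfl, scanA_true]
    constructor
    · intro h x hx y hy
      have hv : ∀ z ∈ v :: ws, sig v = sig z := by
        intro z hz
        rcases List.mem_cons.mp hz with rfl | hz
        · rfl
        · have := h z hz
          rw [is_friend_eq] at this
          exact beq_iff_eq.mp this
      exact (hv x hx).symm.trans (hv y hy)
    · intro h w hw
      rw [is_friend_eq]
      exact beq_iff_eq.mpr (h v (List.mem_cons_self) w (List.mem_cons_of_mem _ hw))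

-- ---- geometry of cellsB / valsA ----
def inGrid (c : Int × Int) : Prop := 0 ≤ c.1 ∧ c.1 < 4 ∧ 0 ≤ c.2 ∧ c.2 < 4

lemma mem_cellsB (c : Int × Int) : c ∈ cellsB ↔ inGrid c := by
  obtain ⟨x, y⟩ := c
  simp only [cellsB, inGrid, List.mem_flatMap, List.mem_map, PySem.List.mem_pyRange_one,
    Prod.mk.injEq]
  constructor
  · rintro ⟨a, ha, b, hb, rfl, rfl⟩
    exact ⟨ha.1, ha.2, hb.1, hb.2⟩
  · rintro ⟨h1, h2, h3, h4⟩
    exact ⟨x, ⟨h1, h2⟩, y, ⟨h3, h4⟩, rfl, rfl⟩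

lemma mem_valsA (t : List (List Int)) (i j x : Int) :
    x ∈ valsA t i j ↔
      ∃ u : Int × Int, inGrid u ∧ u ≠ (i, j) ∧ |u.1 - i| ≤ 1 ∧ |u.2 - j| ≤ 1 ∧
        x = cellAt t u.1 u.2 := by
  simp only [valsA, neighValsRow, List.mem_flatMap, List.mem_filter, List.mem_map,
    PySem.List.mem_pyRange_one, decide_eq_true_eq]
  constructor
  · rintro ⟨a, ha, b, ⟨hb, hc⟩, rfl⟩
    refine ⟨(i + a, j + b), ⟨hc.1, hc.2.1, hc.2.2.1, hc.2.2.2.1⟩, ?_, ?_, ?_, rfl⟩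
    · intro hcontra
      rw [Prod.mk.injEq] at hcontra
      rcases hc.2.2.2.2 with h0 | h0 <;> omega
    · show |i + a - i| ≤ 1
      rw [abs_le]; omega
    · show |j + b - j| ≤ 1
      rw [abs_le]; omega
  · rintro ⟨⟨p, q⟩, hg, hne, h1, h2, rfl⟩
    have hg' : 0 ≤ p ∧ p < 4 ∧ 0 ≤ q ∧ q < 4 := hg
    obtain ⟨g1, g2, g3, g4⟩ := hg'
    simp only at h1 h2
    rw [abs_le] at h1 h2
    have hpq : ¬(p = i ∧ q = j) := fun ⟨hp, hq⟩ => hne (by rw [hp, hq])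
    refine ⟨p - i, ⟨by omega, by omega⟩, q - j, ⟨⟨by omega, by omega⟩, ?_⟩, ?_⟩
    · exact ⟨by omega, by omega, by omega, by omega, by omega⟩
    · have e1 : i + (p - i) = p := by ring
      have e2 : j + (q - j) = q := by ring
      rw [e1, e2]

-- ---- the bad table ----
def cover (u v c : Int × Int) : Prop :=
  c ≠ u ∧ c ≠ v ∧ |c.1 - u.1| ≤ 1 ∧ |c.2 - u.2| ≤ 1 ∧ |c.1 - v.1| ≤ 1 ∧ |c.2 - v.2| ≤ 1

def discord (t : List (List Int)) (u v : Int × Int) : Prop :=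
  (u.1 < v.1 ∨ (u.1 = v.1 ∧ u.2 < v.2)) ∧ cellAt (sigTable t) u.1 u.2 ≠ cellAt (sigTable t) v.1 v.2

def Shape (bad : List (List Bool)) : Prop := bad.length = 4 ∧ ∀ r ∈ bad, r.length = 4

lemma shape_init : Shape (List.replicate 4 (List.replicate 4 false)) := by
  constructor
  · simp
  · intro r hr
    rw [List.eq_of_mem_replicate hr]
    simp

lemma shape_setCell {bad : List (List Bool)} {c : Int × Int}
    (hS : Shape bad) (hc : inGrid c) : Shape (setCell bad c) := by
  obtain ⟨hl, hr⟩ := hS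
  constructor
  · simp [setCell, hl]
  · intro r hrm
    rcases List.mem_or_eq_of_mem_set hrm with h | rfl
    · exact hr r h
    · rw [List.length_set]
      apply hr
      rw [PySem.List.pyGetD_eq_getElem bad [] hc.1 (by rw [hl]; exact_mod_cast hc.2.1)]
      exact List.getElem_mem _

lemma getCell_setCell {bad : List (List Bool)} {c c' : Int × Int}
    (hS : Shape bad) (hc : inGrid c) (hc' : inGrid c') :
    getCell (setCell bad c) c' = if c' = c then true else getCell bad c' := by
  obtain ⟨hl, hr⟩ := hS
  obtain ⟨hc1, hc2, hc3, hc4⟩ := hc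
  obtain ⟨hd1, hd2, hd3, hd4⟩ := hc'
  have hrow_mem : PySem.List.pyGetD bad c.1 [] ∈ bad := by
    rw [PySem.List.pyGetD_eq_getElem bad [] hc1 (by rw [hl]; exact_mod_cast hc2)]
    exact List.getElem_mem _
  have hrowlen : (PySem.List.pyGetD bad c.1 []).length = 4 := hr _ hrow_mem
  rw [getCell, setCell, PySem.List.pyGetD_of_nonneg _ _ hd1,
    List.getD_eq_getElem?_getD, List.getElem?_set]
  by_cases h1 : c'.1 = c.1
  · have heq : c.1.toNat = c'.1.toNat := by omega
    rw [if_pos heq, if_pos (by omega : c.1.toNat < bad.length)]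
    simp only [Option.getD_some]
    rw [PySem.List.pyGetD_of_nonneg _ _ hd3, List.getD_eq_getElem?_getD, List.getElem?_set]
    by_cases h2 : c'.2 = c.2
    · have heq2 : c.2.toNat = c'.2.toNat := by omega
      rw [if_pos heq2, if_pos (by rw [hrowlen]; omega : c.2.toNat < (PySem.List.pyGetD bad c.1 []).length)]
      rw [if_pos (Prod.ext h1 h2)]
      rfl
    · have hne2 : ¬(c.2.toNat = c'.2.toNat) := by omega
      rw [if_neg hne2, if_neg (fun hcc => h2 (by rw [hcc]))]
      rw [getCell, h1, PySem.List.pyGetD_of_nonneg _ _ hd3, List.getD_eq_getElem?_getD]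
  · have hne : ¬(c.1.toNat = c'.1.toNat) := by omega
    rw [if_neg hne, if_neg (fun hcc => h1 (by rw [hcc]))]
    rw [getCell, PySem.List.pyGetD_of_nonneg _ _ hd1, List.getD_eq_getElem?_getD]

-- marking fold over an arbitrary cell list
def markFold (u v : Int × Int) (L : List (Int × Int)) (bad : List (List Bool)) :
    List (List Bool) :=
  L.foldl (fun bad c =>
    if c ≠ u ∧ c ≠ v ∧ |c.1 - u.1| ≤ 1 ∧ |c.2 - u.2| ≤ 1 ∧ |c.1 - v.1| ≤ 1 ∧ |c.2 - v.2| ≤ 1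
    then setCell bad c else bad) bad

lemma markPair_eq (bad : List (List Bool)) (u v : Int × Int) :
    markPair bad u v = markFold u v cellsB bad := rfl

lemma shape_markFold (u v : Int × Int) :
    ∀ (L : List (Int × Int)) (bad : List (List Bool)), Shape bad → (∀ x ∈ L, inGrid x) →
      Shape (markFold u v L bad) := by
  intro L
  induction L with
  | nil => intro bad hS _; exact hS
  | cons x xs ih =>
    intro bad hS hL
    rw [markFold, List.foldl_cons]
    by_cases hcov : x ≠ u ∧ x ≠ v ∧ |x.1 - u.1| ≤ 1 ∧ |x.2 - u.2| ≤ 1 ∧ |x.1 - v.1| ≤ 1 ∧ |x.2 - v.2| ≤ 1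
    · rw [if_pos hcov]
      exact ih _ (shape_setCell hS (hL x List.mem_cons_self)) (fun y hy => hL y (List.mem_cons_of_mem _ hy))
    · rw [if_neg hcov]
      exact ih _ hS (fun y hy => hL y (List.mem_cons_of_mem _ hy))

lemma getCell_markFold (u v c : Int × Int) (hc : inGrid c) :
    ∀ (L : List (Int × Int)) (bad : List (List Bool)), Shape bad → (∀ x ∈ L, inGrid x) →
      (getCell (markFold u v L bad) c = true ↔
        (getCell bad c = true ∨ (c ∈ L ∧ cover u v c))) := by
  intro L
  induction L with
  | nil => intro bad _ _; simp [markFold]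
  | cons x xs ih =>
    intro bad hS hL
    rw [markFold, List.foldl_cons]
    have hxg := hL x List.mem_cons_self
    have hxs := fun y hy => hL y (List.mem_cons_of_mem _ hy)
    by_cases hcov : x ≠ u ∧ x ≠ v ∧ |x.1 - u.1| ≤ 1 ∧ |x.2 - u.2| ≤ 1 ∧ |x.1 - v.1| ≤ 1 ∧ |x.2 - v.2| ≤ 1
    · rw [if_pos hcov]
      rw [show (xs.foldl _ (setCell bad x) : List (List Bool)) = markFold u v xs (setCell bad x) from rfl]
      rw [ih _ (shape_setCell hS hxg) hxs, getCell_setCell hS hxg hc]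
      by_cases hcx : c = x
      · subst hcx
        constructor
        · intro _
          exact Or.inr ⟨List.mem_cons_self, hcov⟩
        · intro _
          left; simp
      · rw [if_neg hcx]
        constructor
        · rintro (h | h)
          · exact Or.inl h
          · exact Or.inr ⟨List.mem_cons_of_mem _ h.1, h.2⟩
        · rintro (h | ⟨hm, hcv⟩)
          · exact Or.inl h
          · rcases List.mem_cons.mp hm with rfl | hm'
            · exact absurd rfl hcx
            · exact Or.inr ⟨hm', hcv⟩
    · rw [if_neg hcov]
      rw [show (xs.foldl _ bad : List (List Bool)) = markFold u v xs bad from rfl]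
      rw [ih _ hS hxs]
      constructor
      · rintro (h | h)
        · exact Or.inl h
        · exact Or.inr ⟨List.mem_cons_of_mem _ h.1, h.2⟩
      · rintro (h | ⟨hm, hcv⟩)
        · exact Or.inl h
        · rcases List.mem_cons.mp hm with rfl | hm'
          · exact absurd hcv hcov
          · exact Or.inr ⟨hm', hcv⟩

lemma shape_markPair {bad : List (List Bool)} (u v : Int × Int) (hS : Shape bad) :
    Shape (markPair bad u v) := by
  rw [markPair_eq]
  exact shape_markFold u v cellsB bad hS (fun x hx => (mem_cellsB x).mp hx)

lemma getCell_markPair (u v c : Int × Int) {bad : List (List Bool)}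
    (hS : Shape bad) (hc : inGrid c) :
    (getCell (markPair bad u v) c = true ↔ (getCell bad c = true ∨ cover u v c)) := by
  rw [markPair_eq, getCell_markFold u v c hc cellsB bad hS (fun x hx => (mem_cellsB x).mp hx)]
  have : c ∈ cellsB := (mem_cellsB c).mpr hc
  constructor
  · rintro (h | h)
    · exact Or.inl h
    · exact Or.inr h.2
  · rintro (h | h)
    · exact Or.inl h
    · exact Or.inr ⟨this, h⟩

-- inner fold over v, outer fold over u
def innerFold (t : List (List Int)) (u : Int × Int) (M : List (Int × Int))
    (bad : List (List Bool)) : List (List Bool) :=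
  M.foldl (fun bad v =>
    if (u.1 < v.1 ∨ (u.1 = v.1 ∧ u.2 < v.2)) ∧
        cellAt (sigTable t) u.1 u.2 ≠ cellAt (sigTable t) v.1 v.2
    then markPair bad u v else bad) bad

def outerFold (t : List (List Int)) (L : List (Int × Int)) (bad : List (List Bool)) :
    List (List Bool) :=
  L.foldl (fun bad u => innerFold t u cellsB bad) bad

lemma badTable_eq (t : List (List Int)) :
    badTable t = outerFold t cellsB (List.replicate 4 (List.replicate 4 false)) := rfl

lemma shape_innerFold (t : List (List Int)) (u : Int × Int) :
    ∀ (M : List (Int × Int)) (bad : List (List Bool)), Shape bad →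
      Shape (innerFold t u M bad) := by
  intro M
  induction M with
  | nil => intro bad hS; exact hS
  | cons v vs ih =>
    intro bad hS
    rw [innerFold, List.foldl_cons]
    by_cases hq : (u.1 < v.1 ∨ (u.1 = v.1 ∧ u.2 < v.2)) ∧
        cellAt (sigTable t) u.1 u.2 ≠ cellAt (sigTable t) v.1 v.2
    · rw [if_pos hq]; exact ih _ (shape_markPair u v hS)
    · rw [if_neg hq]; exact ih _ hS

lemma getCell_innerFold (t : List (List Int)) (u c : Int × Int) (hc : inGrid c) :
    ∀ (M : List (Int × Int)) (bad : List (List Bool)), Shape bad →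
      (getCell (innerFold t u M bad) c = true ↔
        (getCell bad c = true ∨ ∃ v ∈ M, discord t u v ∧ cover u v c)) := by
  intro M
  induction M with
  | nil => intro bad _; simp [innerFold]
  | cons v vs ih =>
    intro bad hS
    rw [innerFold, List.foldl_cons]
    by_cases hq : (u.1 < v.1 ∨ (u.1 = v.1 ∧ u.2 < v.2)) ∧
        cellAt (sigTable t) u.1 u.2 ≠ cellAt (sigTable t) v.1 v.2
    · rw [if_pos hq]
      rw [show (vs.foldl _ (markPair bad u v) : List (List Bool))
            = innerFold t u vs (markPair bad u v) from rfl]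
      rw [ih _ (shape_markPair u v hS), getCell_markPair u v c hS hc]
      constructor
      · rintro ((h | h) | ⟨w, hw, hd, hcv⟩)
        · exact Or.inl h
        · exact Or.inr ⟨v, List.mem_cons_self, hq, h⟩
        · exact Or.inr ⟨w, List.mem_cons_of_mem _ hw, hd, hcv⟩
      · rintro (h | ⟨w, hw, hd, hcv⟩)
        · exact Or.inl (Or.inl h)
        · rcases List.mem_cons.mp hw with rfl | hw'
          · exact Or.inl (Or.inr hcv)
          · exact Or.inr ⟨w, hw', hd, hcv⟩
    · rw [if_neg hq]
      rw [show (vs.foldl _ bad : List (List Bool)) = innerFold t u vs bad from rfl]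
      rw [ih _ hS]
      constructor
      · rintro (h | ⟨w, hw, hd, hcv⟩)
        · exact Or.inl h
        · exact Or.inr ⟨w, List.mem_cons_of_mem _ hw, hd, hcv⟩
      · rintro (h | ⟨w, hw, hd, hcv⟩)
        · exact Or.inl h
        · rcases List.mem_cons.mp hw with rfl | hw'
          · exact absurd hd hq
          · exact Or.inr ⟨w, hw', hd, hcv⟩

lemma getCell_outerFold (t : List (List Int)) (c : Int × Int) (hc : inGrid c) :
    ∀ (L : List (Int × Int)) (bad : List (List Bool)), Shape bad →
      (getCell (outerFold t L bad) c = true ↔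
        (getCell bad c = true ∨ ∃ u ∈ L, ∃ v ∈ cellsB, discord t u v ∧ cover u v c)) := by
  intro L
  induction L with
  | nil => intro bad _; simp [outerFold]
  | cons u us ih =>
    intro bad hS
    rw [outerFold, List.foldl_cons]
    rw [show (us.foldl _ (innerFold t u cellsB bad) : List (List Bool))
          = outerFold t us (innerFold t u cellsB bad) from rfl]
    rw [ih _ (shape_innerFold t u cellsB bad hS), getCell_innerFold t u c hc cellsB bad hS]
    constructor
    · rintro ((h | ⟨v, hv, hd, hcv⟩) | ⟨w, hw, hrest⟩)
      · exact Or.inl h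
      · exact Or.inr ⟨u, List.mem_cons_self, v, hv, hd, hcv⟩
      · exact Or.inr ⟨w, List.mem_cons_of_mem _ hw, hrest⟩
    · rintro (h | ⟨w, hw, hrest⟩)
      · exact Or.inl (Or.inl h)
      · rcases List.mem_cons.mp hw with rfl | hw'
        · exact Or.inl (Or.inr hrest)
        · exact Or.inr ⟨w, hw', hrest⟩

lemma getCell_init (c : Int × Int) (hc : inGrid c) :
    getCell (List.replicate 4 (List.replicate 4 false)) c = false := by
  obtain ⟨h1, h2, h3, h4⟩ := hc
  rw [getCell, PySem.List.pyGetD_eq_getElem _ [] h1 (by simpa using h2),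
    List.getElem_replicate, PySem.List.pyGetD_eq_getElem _ false h3 (by simpa using h4),
    List.getElem_replicate]

lemma getCell_badTable (t : List (List Int)) (c : Int × Int) (hc : inGrid c) :
    (getCell (badTable t) c = true ↔
      ∃ u ∈ cellsB, ∃ v ∈ cellsB, discord t u v ∧ cover u v c) := by
  rw [badTable_eq, getCell_outerFold t c hc cellsB _ shape_init, getCell_init c hc]
  simp

-- ---- signature table lookup ----
lemma cellAt_sigTable (t : List (List Int)) (x y : Int)
    (hx0 : 0 ≤ x) (hx4 : x < 4) (hy0 : 0 ≤ y) (hy4 : y < 4) :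
    cellAt (sigTable t) x y = sig (cellAt t x y) := by
  interval_cases x <;> interval_cases y <;> rfl

-- ---- the per-cell equivalence ----
lemma cell_iff (t : List (List Int)) (i j : Int) (hij : inGrid (i, j)) :
    ((loopA_A t i j (PySem.List.pyRange (-1) 2 1) false 0).1 = true) ↔
      getCell (badTable t) (i, j) = false := by
  rw [loopA_scanA, show ((PySem.List.pyRange (-1) 2 1).flatMap
      (fun a => neighValsRow t i j a (PySem.List.pyRange (-1) 2 1))) = valsA t i j from rfl,
    scanA_allEq, ← Bool.not_eq_true, getCell_badTable t (i, j) hij]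
  constructor
  · rintro hall ⟨u, hu, v, hv, ⟨hlex, hne⟩, hcu, hcv, h1, h2, h3, h4⟩
    have hug := (mem_cellsB u).mp hu
    have hvg := (mem_cellsB v).mp hv
    rw [cellAt_sigTable t u.1 u.2 hug.1 hug.2.1 hug.2.2.1 hug.2.2.2,
      cellAt_sigTable t v.1 v.2 hvg.1 hvg.2.1 hvg.2.2.1 hvg.2.2.2] at hne
    apply hne
    apply hall
    · rw [mem_valsA]
      exact ⟨u, hug, Ne.symm hcu, by rw [abs_sub_comm]; exact h1, by rw [abs_sub_comm]; exact h2, rfl⟩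
    · rw [mem_valsA]
      exact ⟨v, hvg, Ne.symm hcv, by rw [abs_sub_comm]; exact h3, by rw [abs_sub_comm]; exact h4, rfl⟩
  · intro hno x hx y hy
    by_contra hne
    rw [mem_valsA] at hx hy
    obtain ⟨u, hug, hune, hu1, hu2, rfl⟩ := hx
    obtain ⟨w, hwg, hwne, hw1, hw2, rfl⟩ := hy
    have hsig : cellAt (sigTable t) u.1 u.2 ≠ cellAt (sigTable t) w.1 w.2 := by
      rw [cellAt_sigTable t u.1 u.2 hug.1 hug.2.1 hug.2.2.1 hug.2.2.2,
        cellAt_sigTable t w.1 w.2 hwg.1 hwg.2.1 hwg.2.2.1 hwg.2.2.2]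
      exact hne
    have huw : u ≠ w := by
      intro h; subst h; exact hne rfl
    have hcomp : ¬(u.1 = w.1 ∧ u.2 = w.2) := by
      intro ⟨hp, hq⟩
      exact huw (Prod.ext hp hq)
    have hlex : (u.1 < w.1 ∨ (u.1 = w.1 ∧ u.2 < w.2)) ∨ (w.1 < u.1 ∨ (w.1 = u.1 ∧ w.2 < u.2)) := by
      omega
    apply hno
    rcases hlex with hl | hl
    · exact ⟨u, (mem_cellsB u).mpr hug, w, (mem_cellsB w).mpr hwg, ⟨hl, hsig⟩,
        Ne.symm hune, Ne.symm hwne,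
        by rw [abs_sub_comm]; exact hu1, by rw [abs_sub_comm]; exact hu2,
        by rw [abs_sub_comm]; exact hw1, by rw [abs_sub_comm]; exact hw2⟩
    · exact ⟨w, (mem_cellsB w).mpr hwg, u, (mem_cellsB u).mpr hug, ⟨hl, Ne.symm hsig⟩,
        Ne.symm hwne, Ne.symm hune,
        by rw [abs_sub_comm]; exact hw1, by rw [abs_sub_comm]; exact hw2,
        by rw [abs_sub_comm]; exact hu1, by rw [abs_sub_comm]; exact hu2⟩

-- ===== VERDICT (by name: the statement is the Claim_ definition above) =====
theorem find_touched_friends_spec : Claim_equal_find_touched_friends := by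
  intro t _ _
  unfold Spec_find_touched_friends
  have hA : find_touched_friends t = cellsB.foldl (fun acc c =>
      if (loopA_A t c.1 c.2 (PySem.List.pyRange (-1) 2 1) false 0).1 then acc + 1 else acc) 0 := rfl
  have hB : find_touched_friends_alt t = cellsB.foldl (fun acc c =>
      if getCell (badTable t) c = false then acc + 1 else acc) 0 := rfl
  rw [hA, hB]
  apply PySem.List.foldl_congr_mem
  intro acc c hcm
  obtain ⟨i, j⟩ := c
  exact if_congr (cell_iff t i j ((mem_cellsB (i, j)).mp hcm)) rfl rfl
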